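-- pv_equiv track=rewrite | github.com/chungeun-choi/algorithms | studygroup/7week/sliace_list.py | solution
-- ===== SOURCE A (Python) =====
-- def solution(n, left, right):
--     answer = []
--     list_value = [i for i in range(1,n+1)]
--     answer = answer+list_value
--     for i in range(1,n):
--         value = [ i+1 for j in range(i+1)]+list_value[i+1:]
--         answer = answer + value
--     return answer[left:right+1]
-- ===== SOURCE B (Python) =====
-- def solution(n, left, right):
--     # length of the flattened n x n matrix (empty when n <= 0)
--     total = n * n if n > 0 else 0
--     # normalize the Python slice bounds [left : right+1] for a list of length `total`
--     start = left + total if left < 0 else left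
--     start = min(max(start, 0), total)
--     stop = right + 1
--     stop = stop + total if stop < 0 else stop
--     stop = min(max(stop, 0), total)
--     # element k of the flattened matrix is max(row, col) + 1
--     return [max(k // n, k % n) + 1 for k in range(start, stop)]
-- ===== Notes on version B (the rewrite author's own statement) =====
-- stated objective: faster
-- what changed: Instead of materializing the whole n*n flattened matrix row by row and slicing it, B normalizes the slice bounds arithmetically and computes only the requested entries by the closed form max(k//n, k%n)+1.
import Mathlib
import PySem

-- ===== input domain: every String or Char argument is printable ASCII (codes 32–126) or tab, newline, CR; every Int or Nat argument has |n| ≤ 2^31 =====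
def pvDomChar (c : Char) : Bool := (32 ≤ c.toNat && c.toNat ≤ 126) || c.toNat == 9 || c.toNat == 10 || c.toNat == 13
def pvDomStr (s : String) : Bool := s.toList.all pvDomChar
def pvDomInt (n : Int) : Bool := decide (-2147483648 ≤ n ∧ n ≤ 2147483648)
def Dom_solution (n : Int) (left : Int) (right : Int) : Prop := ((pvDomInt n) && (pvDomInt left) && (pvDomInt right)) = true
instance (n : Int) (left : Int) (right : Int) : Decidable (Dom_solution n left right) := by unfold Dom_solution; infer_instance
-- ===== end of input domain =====

-- B replaces A's O(n^2) row-by-row matrix construction by computing only the sliced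
-- entries via the closed form max(k//n, k%n)+1 (objective: faster, asymptotic).

-- ===== PORT A =====
def solution (n : Int) (left : Int) (right : Int) : List Int :=
  let answer : List Int := []
  let list_value : List Int := PySem.List.pyRange 1 (n + 1) 1
  let answer := answer ++ list_value
  let answer := (PySem.List.pyRange 1 n 1).foldl
    (fun answer i =>
      let value := (PySem.List.pyRange 0 (i + 1) 1).map (fun _ => i + 1)
        ++ PySem.List.slice list_value (some (i + 1)) none
      answer ++ value) answer
  PySem.List.slice answer (some left) (some (right + 1))

-- ===== PORT B =====
def solution_alt (n : Int) (left : Int) (right : Int) : List Int :=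
  let total : Int := if 0 < n then n * n else 0
  let start := if left < 0 then left + total else left
  let start := min (max start 0) total
  let stop := right + 1
  let stop := if stop < 0 then stop + total else stop
  let stop := min (max stop 0) total
  (PySem.List.pyRange start stop 1).map
    (fun k => max (PySem.Int.floordiv k n) (PySem.Int.mod k n) + 1)

-- ===== PRECONDITION & SPEC =====
def Spec_solution (n : Int) (left : Int) (right : Int) (out : List Int) : Prop := out = solution_alt n left right
instance (n : Int) (left : Int) (right : Int) (out : List Int) : Decidable (Spec_solution n left right out) := by unfold Spec_solution; infer_instance

-- ===== CLAIM (what is proved, stated in full; the proofs are below) =====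
def Claim_equal_solution : Prop := ∀ (n : Int) (left : Int) (right : Int), Dom_solution n left right → Spec_solution n left right (solution n left right)

-- ===== LEMMAS AND PROOFS =====


theorem pvRangeDrop (L A : Nat) :
    (List.range L).drop A = (List.range (L - A)).map (fun k => A + k) := by
  apply List.ext_getElem
  · simp
  · intro i h1 h2
    simp

theorem pvRangeSeg (L A B : Nat) (hB : B ≤ L) :
    ((List.range L).drop A).take (B - A) = (List.range (B - A)).map (fun k => A + k) := by
  apply List.ext_getElem
  · simp; omega
  · intro i h1 h2
    simp

/-- The value of cell `k` of the flattened matrix. -/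
def pvF (n k : Int) : Int := max (PySem.Int.floordiv k n) (PySem.Int.mod k n) + 1

theorem pvRange_drop (a b : Int) (m : Nat) :
    (PySem.List.pyRange a b 1).drop m = PySem.List.pyRange (a + m) b 1 := by
  rw [PySem.List.pyRange_one, PySem.List.pyRange_one, ← List.map_drop,
    pvRangeDrop, List.map_map]
  have h : (b - (a + (m : Int))).toNat = (b - a).toNat - m := by omega
  rw [h]
  refine List.map_congr_left ?_
  intro k _
  simp; ring

theorem pvRange_map_add_one (a b : Int) :
    (PySem.List.pyRange a b 1).map (fun j => j + 1) = PySem.List.pyRange (a + 1) (b + 1) 1 := by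
  rw [PySem.List.pyRange_one, PySem.List.pyRange_one, List.map_map]
  have h : (b + 1 - (a + 1)).toNat = (b - a).toNat := by omega
  rw [h]
  refine List.map_congr_left ?_
  intro k _
  simp; ring

theorem pvClampIdx_cast (L : Nat) (a : Int) :
    ((PySem.List.clampIdx L a : Nat) : Int) = min (max (if a < 0 then a + L else a) 0) (L : Int) := by
  simp only [PySem.List.clampIdx]
  split_ifs <;> omega

theorem pvSlice_map_pyRange (g : Int → Int) (L : Nat) (a b : Int) :
    PySem.List.slice ((PySem.List.pyRange 0 (L : Int) 1).map g) (some a) (some b)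
      = (PySem.List.pyRange (PySem.List.clampIdx L a : Nat) (PySem.List.clampIdx L b : Nat) 1).map g := by
  have hA : PySem.List.clampIdx L a ≤ L := by simp only [PySem.List.clampIdx]; split_ifs <;> omega
  have hB : PySem.List.clampIdx L b ≤ L := by simp only [PySem.List.clampIdx]; split_ifs <;> omega
  have hlen : ((PySem.List.pyRange 0 (L : Int) 1).map g).length = L := by
    rw [List.length_map, PySem.List.length_pyRange_one]; omega
  simp only [PySem.List.slice, hlen]
  set A := PySem.List.clampIdx L a with hAdef
  set B := PySem.List.clampIdx L b with hBdef
  rw [PySem.List.pyRange_one 0 (L : Int), PySem.List.pyRange_one (A : Int) (B : Int)]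
  have h1 : ((L : Int) - 0).toNat = L := by omega
  have h2 : (((B : Int)) - (A : Int)).toNat = B - A := by omega
  rw [h1, h2, List.map_map, ← List.map_drop, ← List.map_take,
    pvRangeSeg L A B hB, List.map_map, List.map_map]
  refine List.map_congr_left ?_
  intro k _
  simp only [Function.comp_apply]
  congr 1
  push_cast; ring

theorem pvRow_eq (n i : Int) (h0 : 0 ≤ i) (h1 : i < n) :
    (PySem.List.pyRange 0 n 1).map (fun j => max i j + 1)
      = (PySem.List.pyRange (i * n) ((i + 1) * n) 1).map (pvF n) := by
  have hn : 0 < n := by omega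
  rw [PySem.List.pyRange_one 0 n, PySem.List.pyRange_one (i * n) ((i + 1) * n), List.map_map, List.map_map]
  have h : ((i + 1) * n - i * n).toNat = (n - 0).toNat := by
    have e : (i + 1) * n - i * n = n := by ring
    rw [e]
    omega
  rw [h]
  refine List.map_congr_left ?_
  intro k hk
  simp only [List.mem_range] at hk
  have hkn : (k : Int) < n := by omega
  have hk0 : (0 : Int) ≤ (k : Int) := by positivity
  simp only [Function.comp_apply, pvF]
  have hdiv : PySem.Int.floordiv (i * n + k) n = i := by
    rw [PySem.Int.floordiv_eq_ediv_of_pos hn]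
    have e : i * n + (k : Int) = (k : Int) + i * n := by ring
    rw [e, Int.add_mul_ediv_right _ _ (by omega : n ≠ 0),
      Int.ediv_eq_zero_of_lt hk0 hkn]; ring
  have hmod : PySem.Int.mod (i * n + k) n = k := by
    rw [PySem.Int.mod_eq_emod_of_pos hn]
    have e : i * n + (k : Int) = (k : Int) + n * i := by ring
    rw [e, Int.add_mul_emod_self_left]
    exact Int.emod_eq_of_lt hk0 hkn
  rw [hdiv, hmod]
  simp

theorem pvFold_eq (n : Int) (hn : 0 < n) :
    ∀ m : Int, 1 ≤ m → m ≤ n →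
      (PySem.List.pyRange 1 m 1).foldl
        (fun answer i =>
          let value := (PySem.List.pyRange 0 (i + 1) 1).map (fun _ => i + 1)
            ++ PySem.List.slice (PySem.List.pyRange 1 (n + 1) 1) (some (i + 1)) none
          answer ++ value) (PySem.List.pyRange 1 (n + 1) 1)
      = (PySem.List.pyRange 0 (m * n) 1).map (pvF n) := by
  intro m hm
  induction m, hm using Int.le_induction with
  | base =>
    intro _
    rw [PySem.List.pyRange_one_eq_nil (by omega : (1 : Int) ≤ 1)]
    simp only [List.foldl_nil, one_mul]
    have h1 : PySem.List.pyRange 1 (n + 1) 1 = (PySem.List.pyRange 0 n 1).map (fun j => j + 1) := by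
      rw [pvRange_map_add_one]; norm_num
    rw [h1]
    have h2 : (PySem.List.pyRange 0 n 1).map (fun j => j + 1)
        = (PySem.List.pyRange 0 n 1).map (fun j => max 0 j + 1) := by
      refine List.map_congr_left ?_
      intro j hj
      rw [PySem.List.mem_pyRange_one] at hj
      rw [max_eq_right hj.1]
    rw [h2, pvRow_eq n 0 le_rfl hn, zero_mul, zero_add, one_mul]
  | succ m hm1 ih =>
    intro hmn
    rw [PySem.List.pyRange_one_succ_right (by omega : (1 : Int) ≤ m), List.foldl_append,
      ih (by omega)]
    simp only [List.foldl_cons, List.foldl_nil]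
    have hrow : (PySem.List.pyRange 0 (m + 1) 1).map (fun _ => m + 1)
        ++ PySem.List.slice (PySem.List.pyRange 1 (n + 1) 1) (some (m + 1)) none
        = (PySem.List.pyRange (m * n) ((m + 1) * n) 1).map (pvF n) := by
      rw [← pvRow_eq n m (by omega) (by omega)]
      rw [PySem.List.slice_some_none]
      have hlen : (PySem.List.pyRange 1 (n + 1) 1).length = n.toNat := by
        rw [PySem.List.length_pyRange_one]; omega
      have hclamp : PySem.List.clampIdx (PySem.List.pyRange 1 (n + 1) 1).length (m + 1)
          = (m + 1).toNat := by
        rw [hlen]; simp only [PySem.List.clampIdx]; split_ifs <;> omega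
      rw [hclamp, pvRange_drop]
      have hc : (1 : Int) + ((m + 1).toNat : Int) = (m + 1) + 1 := by omega
      rw [hc]
      have hsplit : PySem.List.pyRange 0 n 1
          = PySem.List.pyRange 0 (m + 1) 1 ++ PySem.List.pyRange (m + 1) n 1 :=
        PySem.List.pyRange_one_append 0 (m + 1) n (by omega) (by omega)
      rw [hsplit, List.map_append]
      congr 1
      · refine List.map_congr_left ?_
        intro j hj
        rw [PySem.List.mem_pyRange_one] at hj
        rw [max_eq_left (by omega)]
      · have htail : PySem.List.pyRange (m + 1 + 1) (n + 1) 1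
            = (PySem.List.pyRange (m + 1) n 1).map (fun j => j + 1) := by
          rw [pvRange_map_add_one]
        rw [htail]
        refine List.map_congr_left ?_
        intro j hj
        rw [PySem.List.mem_pyRange_one] at hj
        rw [max_eq_right (by omega)]
    rw [hrow, ← List.map_append, ← PySem.List.pyRange_one_append 0 (m * n) ((m + 1) * n)
      (by positivity) (by nlinarith)]

theorem pvBuild_eq (n : Int) :
    (([] : List Int) ++ PySem.List.pyRange 1 (n + 1) 1
        |> fun lv => (PySem.List.pyRange 1 n 1).foldl
          (fun answer i =>
            let value := (PySem.List.pyRange 0 (i + 1) 1).map (fun _ => i + 1)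
              ++ PySem.List.slice (PySem.List.pyRange 1 (n + 1) 1) (some (i + 1)) none
            answer ++ value) lv)
      = (PySem.List.pyRange 0 (if 0 < n then n * n else 0) 1).map (pvF n) := by
  by_cases hn : 0 < n
  · simp only [hn, if_pos, List.nil_append]
    exact pvFold_eq n hn n (by omega) le_rfl
  · simp only [hn, if_neg, not_false_iff, List.nil_append]
    rw [PySem.List.pyRange_one_eq_nil (by omega : n ≤ 1),
      PySem.List.pyRange_one_eq_nil (by omega : n + 1 ≤ 1),
      PySem.List.pyRange_one_eq_nil (by omega : (0 : Int) ≤ 0)]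
    simp

-- ===== VERDICT (by name: the statement is the Claim_ definition above) =====
theorem solution_spec : Claim_equal_solution := by
  intro n left right _
  unfold Spec_solution solution solution_alt
  have hbuild := pvBuild_eq n
  simp only [List.nil_append] at hbuild ⊢
  rw [hbuild]
  set total : Int := if 0 < n then n * n else 0 with htot
  have htotnn : 0 ≤ total := by rw [htot]; split_ifs <;> positivity
  obtain ⟨T, hT⟩ : ∃ T : Nat, total = (T : Int) := ⟨total.toNat, by omega⟩
  rw [hT, pvSlice_map_pyRange (pvF n) T left (right + 1),
    pvClampIdx_cast T left, pvClampIdx_cast T (right + 1), ← hT]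
  rfl
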